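-- pv_equiv track=rewrite | github.com/devashishkatoriya/Interview_Query_Questions_Solutions | Data Problem 76 Decreasing subsequent values.py | dec_subsq_val
-- ===== SOURCE A (Python) =====
-- def dec_subsq_val(arr):
--     """Function to calculate decreasing subsequent values"""
--
--     n = len(arr)
--     output = []
--
--     for i in range(0, n):
--         curr = arr[i]
--         correct = True
--
--         for j in range(i, n):
--             if (curr < arr[j]):
--                 correct = False
--                 break
--
--         if correct:
--             output.append(curr)
--
--     return output
-- ===== SOURCE B (Python) =====
-- def dec_subsq_val(arr):
--     """Suffix-maximum scan: one pass from the right, keep x iff x >= max of later elements."""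
--     out = []
--     mx = None
--     for x in reversed(arr):
--         if mx is None or x >= mx:
--             out.append(x)
--             mx = x
--     out.reverse()
--     return out
-- ===== Notes on version B (the rewrite author's own statement) =====
-- stated objective: faster
-- what changed: Replaced the nested suffix scan per index with a single right-to-left pass tracking the running suffix maximum, keeping an element iff it is >= that maximum.
import Mathlib
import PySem

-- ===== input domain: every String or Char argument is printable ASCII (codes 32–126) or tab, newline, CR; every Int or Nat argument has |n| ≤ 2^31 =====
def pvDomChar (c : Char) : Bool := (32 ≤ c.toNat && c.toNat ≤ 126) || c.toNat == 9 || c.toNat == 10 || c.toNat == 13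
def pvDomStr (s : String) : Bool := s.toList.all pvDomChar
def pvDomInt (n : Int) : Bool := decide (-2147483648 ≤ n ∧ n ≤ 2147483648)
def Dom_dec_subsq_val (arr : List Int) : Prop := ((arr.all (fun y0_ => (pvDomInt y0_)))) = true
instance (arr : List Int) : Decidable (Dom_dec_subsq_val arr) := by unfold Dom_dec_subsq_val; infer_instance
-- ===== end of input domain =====

-- B replaces A's O(n^2) nested suffix scan by one right-to-left pass with a running suffix maximum (asymptotic speed-up).

-- ===== PORT A =====
-- inner loop 'for j in range(i, n): if curr < arr[j]: correct = False; break', scanning arr[i:]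
def decCheck (curr : Int) : List Int → Bool
  | [] => true
  | x :: rest => if curr < x then false else decCheck curr rest

def dec_subsq_val (arr : List Int) : List Int :=
  (List.range arr.length).foldl
    (fun output i =>
      let curr := arr.getD i 0
      if decCheck curr (arr.drop i) then output ++ [curr] else output)
    []

-- ===== PORT B =====
-- state (out, mx); out is appended right-to-left, reversed at the end
def dec_subsq_val_alt (arr : List Int) : List Int :=
  (arr.reverse.foldl
    (fun (s : List Int × Option Int) x =>
      match s.2 with
      | none => (s.1 ++ [x], some x)
      | some m => if m ≤ x then (s.1 ++ [x], some x) else s)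
    ([], none)).1.reverse

-- ===== PRECONDITION & SPEC =====
def Spec_dec_subsq_val (arr : List Int) (out : List Int) : Prop := out = dec_subsq_val_alt arr
instance (arr : List Int) (out : List Int) : Decidable (Spec_dec_subsq_val arr out) := by unfold Spec_dec_subsq_val; infer_instance

-- ===== CLAIM (what is proved, stated in full; the proofs are below) =====
def Claim_equal_dec_subsq_val : Prop := ∀ (arr : List Int), Dom_dec_subsq_val arr → Spec_dec_subsq_val arr (dec_subsq_val arr)

-- ===== LEMMAS AND PROOFS =====

-- reference function: structural recursion on the list
def pvRef : List Int → List Int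
  | [] => []
  | x :: rest => if decCheck x rest then x :: pvRef rest else pvRef rest

def pvMaxO : List Int → Option Int
  | [] => none
  | x :: rest =>
    match pvMaxO rest with
    | none => some x
    | some m => some (max x m)

theorem decCheck_eq_maxO (curr : Int) (l : List Int) :
    decCheck curr l = match pvMaxO l with | none => true | some m => decide (m ≤ curr) := by
  induction l with
  | nil => rfl
  | cons x rest ih =>
    simp only [decCheck, pvMaxO, ih]
    cases pvMaxO rest with
    | none => by_cases h : curr < x <;> simp [h] <;> omega
    | some m => by_cases h : curr < x <;> simp [h] <;> omega

-- A in flatMap form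
theorem decA_flatMap (arr : List Int) :
    dec_subsq_val arr = (List.range arr.length).flatMap
      (fun i => if decCheck (arr.getD i 0) (arr.drop i) then [arr.getD i 0] else []) := by
  unfold dec_subsq_val
  rw [show (fun (output : List Int) (i : ℕ) =>
      let curr := arr.getD i 0
      if decCheck curr (arr.drop i) then output ++ [curr] else output)
    = (fun output i => output ++
        (if decCheck (arr.getD i 0) (arr.drop i) then [arr.getD i 0] else [])) from ?_]
  · rw [PySem.List.foldl_append_eq_flatMap]; simp
  · funext output i
    split <;> simp_all [List.getD]

theorem decA_eq_ref (arr : List Int) : dec_subsq_val arr = pvRef arr := by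
  induction arr with
  | nil => rfl
  | cons x rest ih =>
    rw [decA_flatMap] at ih ⊢
    simp only [List.length_cons, List.range_succ_eq_map, List.flatMap_cons, List.flatMap_map]
    simp only [List.getD_cons_succ, List.drop_succ_cons, List.getD_cons_zero, List.drop_zero]
    have hx : decCheck x (x :: rest) = decCheck x rest := by
      simp [decCheck]
    rw [hx, pvRef]
    by_cases h : decCheck x rest <;> simp [h, ← ih]

theorem decB_invariant (l : List Int) :
    l.reverse.foldl
      (fun (s : List Int × Option Int) x =>
        match s.2 with
        | none => (s.1 ++ [x], some x)
        | some m => if m ≤ x then (s.1 ++ [x], some x) else s)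
      ([], none) = ((pvRef l).reverse, pvMaxO l) := by
  induction l with
  | nil => rfl
  | cons x rest ih =>
    simp only [List.reverse_cons, List.foldl_append, ih, List.foldl_cons, List.foldl_nil]
    rw [pvRef, pvMaxO, decCheck_eq_maxO]
    cases h : pvMaxO rest with
    | none =>
      simp
    | some m =>
      by_cases hm : m ≤ x
      · simp [hm]
      · have : ¬ (decide (m ≤ x) = true) := by simp [hm]
        simp [hm, show max x m = m by omega]

theorem decB_eq_ref (arr : List Int) : dec_subsq_val_alt arr = pvRef arr := by
  unfold dec_subsq_val_alt
  rw [decB_invariant]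
  simp

-- ===== VERDICT (by name: the statement is the Claim_ definition above) =====
theorem dec_subsq_val_spec : Claim_equal_dec_subsq_val := by
  intro arr _
  unfold Spec_dec_subsq_val
  rw [decA_eq_ref, decB_eq_ref]
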